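-- pv_equiv track=rewrite | github.com/Pixelatory/cosc4f90 | util.py | numOfInsertedIndels
-- ===== SOURCE A (Python) =====
-- def numOfInsertedIndels(bitmatrix, seq):
--     """Counts the number of indels that are found before the last character in a sequence.
--
--     :type bitmatrix: List[List[int]]
--     :type seq: List[str]
--     :rtype: int
--     """
--     # Remember: bit 0 means character from sequence
--     #           bit 1 means inserting indel
--     count = 0
--
--     for i in range(len(seq)):  # loop through each sequence
--         tmp = 0
--         hitLastChar = False  # whether the last char in the sequence was hit
--         for bit in bitmatrix[i]:
--             if bit == 0:
--                 tmp += 1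
--                 if tmp == len(seq[i]):
--                     hitLastChar = True
--             else:
--                 count += 1
--
--             if hitLastChar:
--                 break
--
--     return count
-- ===== SOURCE B (Python) =====
-- def numOfInsertedIndels(bitmatrix, seq):
--     """Counts the number of indels that are found before the last character in a sequence.
--
--     Different decomposition: per row, collect the positions of the 0-bits once,
--     then read the answer off by position arithmetic instead of per-bit counting
--     with a break flag.
--     """
--     total = 0
--     for row, s in zip(bitmatrix, seq):
--         L = len(s)
--         zeros = [j for j, bit in enumerate(row) if bit == 0]
--         if 1 <= L <= len(zeros):
--             # the L-th zero sits at index zeros[L-1]; everything before it that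
--             # is not a zero is an inserted indel
--             total += zeros[L - 1] + 1 - L
--         else:
--             # last character never reached: every non-zero bit counts
--             total += len(row) - len(zeros)
--     return total
-- ===== Notes on version B (the rewrite author's own statement) =====
-- stated objective: alternative
-- what changed: B replaces A's per-bit counter with break flag by collecting, per row, the positions of the 0-bits once and reading the indel count off by position arithmetic (position of the L-th zero + 1 - L), with zip instead of index loops.
import Mathlib
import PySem

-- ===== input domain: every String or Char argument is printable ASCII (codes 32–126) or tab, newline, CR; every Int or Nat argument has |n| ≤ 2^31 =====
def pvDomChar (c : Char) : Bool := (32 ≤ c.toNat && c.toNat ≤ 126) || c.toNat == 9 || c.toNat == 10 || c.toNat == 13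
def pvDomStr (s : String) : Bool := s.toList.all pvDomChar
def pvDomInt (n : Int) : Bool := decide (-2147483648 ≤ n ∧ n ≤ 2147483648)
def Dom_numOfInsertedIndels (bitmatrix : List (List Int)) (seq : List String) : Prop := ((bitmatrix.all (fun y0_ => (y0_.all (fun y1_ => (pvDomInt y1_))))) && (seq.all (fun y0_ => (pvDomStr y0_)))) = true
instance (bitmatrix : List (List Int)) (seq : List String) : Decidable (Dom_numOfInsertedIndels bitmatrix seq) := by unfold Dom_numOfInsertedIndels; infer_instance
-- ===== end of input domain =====

-- B collects the 0-bit positions of each row once and derives the indel count by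
-- position arithmetic instead of A's per-bit counter with a break flag (objective:
-- alternative decomposition, same cost).

-- ===== PORT A =====
-- A's inner loop: tmp = zeros seen, break (via hitLastChar) once tmp reaches L
def pvaRow (L : Int) : List Int → Int → Int → Int
  | [], _tmp, count => count
  | bit :: rest, tmp, count =>
    if bit = 0 then
      if tmp + 1 = L then count          -- hitLastChar: break, count unchanged
      else pvaRow L rest (tmp + 1) count
    else pvaRow L rest tmp (count + 1)

def numOfInsertedIndels (bitmatrix : List (List Int)) (seq : List String) : Int :=
  (PySem.List.pyRange 0 (seq.length : Int) 1).foldl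
    (fun count i =>
      pvaRow (PySem.Str.len (PySem.List.pyGetD seq i ""))
             (PySem.List.pyGetD bitmatrix i []) 0 count)
    0

-- ===== PORT B =====
def numOfInsertedIndels_alt (bitmatrix : List (List Int)) (seq : List String) : Int :=
  (bitmatrix.zip seq).foldl
    (fun total p =>
      let L := PySem.Str.len p.2
      let zeros := (PySem.List.enumerate p.1 0).filterMap
        (fun jb => if jb.2 = 0 then some jb.1 else none)
      if 1 ≤ L ∧ L ≤ (zeros.length : Int) then
        total + (PySem.List.pyGetD zeros (L - 1) 0 + 1 - L)
      else
        total + ((p.1.length : Int) - (zeros.length : Int)))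
    0

-- ===== PRECONDITION & SPEC =====
-- A indexes bitmatrix[i] for every i < len(seq) and raises IndexError otherwise
def Pre_numOfInsertedIndels (bitmatrix : List (List Int)) (seq : List String) : Prop :=
  seq.length ≤ bitmatrix.length
instance (bitmatrix : List (List Int)) (seq : List String) : Decidable (Pre_numOfInsertedIndels bitmatrix seq) := by unfold Pre_numOfInsertedIndels; infer_instance
def pvWitness_numOfInsertedIndels : List (List Int) × List String := ([[0, 1, 0]], ["ab"])

def Spec_numOfInsertedIndels (bitmatrix : List (List Int)) (seq : List String) (out : Int) : Prop := out = numOfInsertedIndels_alt bitmatrix seq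
instance (bitmatrix : List (List Int)) (seq : List String) (out : Int) : Decidable (Spec_numOfInsertedIndels bitmatrix seq out) := by unfold Spec_numOfInsertedIndels; infer_instance

-- ===== CLAIM (what is proved, stated in full; the proofs are below) =====
def Claim_equal_numOfInsertedIndels : Prop := ∀ (bitmatrix : List (List Int)) (seq : List String), Dom_numOfInsertedIndels bitmatrix seq → Pre_numOfInsertedIndels bitmatrix seq → Spec_numOfInsertedIndels bitmatrix seq (numOfInsertedIndels bitmatrix seq)

-- ===== LEMMAS AND PROOFS =====

-- reference per-row count: non-zero bits seen before the k-th zero (all of them if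
-- fewer than k zeros occur or k ≤ 0)
def pvRowCnt (k : Int) : List Int → Int
  | [] => 0
  | b :: rest => if b = 0 then (if k = 1 then 0 else pvRowCnt (k - 1) rest) else 1 + pvRowCnt k rest

-- A's inner loop computes pvRowCnt of the still-needed zeros
theorem pvaRow_eq (row : List Int) : ∀ (L tmp count : Int),
    pvaRow L row tmp count = count + pvRowCnt (L - tmp) row := by
  induction row with
  | nil => intro L tmp count; simp [pvaRow, pvRowCnt]
  | cons b rest ih =>
    intro L tmp count
    by_cases hb : b = 0
    · by_cases hL : tmp + 1 = L
      · have h1 : L - tmp = 1 := by omega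
        simp [pvaRow, pvRowCnt, hb, hL, h1]
      · have h1 : L - tmp ≠ 1 := by omega
        have h2 : L - (tmp + 1) = L - tmp - 1 := by omega
        simp [pvaRow, pvRowCnt, hb, hL, h1, ih, h2]
    · simp [pvaRow, pvRowCnt, hb, ih]; ring

-- the zero-position list B builds, with enumerate offset n
def pvZeros (n : Int) (row : List Int) : List Int :=
  (PySem.List.enumerate row n).filterMap (fun jb => if jb.2 = 0 then some jb.1 else none)

theorem pvZeros_cons (n : Int) (b : Int) (rest : List Int) :
    pvZeros n (b :: rest) = if b = 0 then n :: pvZeros (n + 1) rest else pvZeros (n + 1) rest := by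
  by_cases hb : b = 0 <;> simp [pvZeros, PySem.List.enumerate_cons, hb]

-- B's per-row value, at enumerate offset n, is pvRowCnt shifted by n in the hit branch
theorem pvBRow_eq (row : List Int) : ∀ (n k : Int),
    (if 1 ≤ k ∧ k ≤ ((pvZeros n row).length : Int) then
       PySem.List.pyGetD (pvZeros n row) (k - 1) 0 + 1 - k
     else ((row.length : Int) - ((pvZeros n row).length : Int)))
    = pvRowCnt k row + (if 1 ≤ k ∧ k ≤ ((pvZeros n row).length : Int) then n else 0) := by
  induction row with
  | nil =>
    intro n k
    simp only [pvZeros, PySem.List.enumerate, List.filterMap_nil, List.length_nil,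
      Nat.cast_zero, pvRowCnt]
    split_ifs with h
    · omega
    · rfl
  | cons b rest ih =>
    intro n k
    by_cases hb : b = 0
    · rw [pvZeros_cons, if_pos hb]
      by_cases hk1 : k = 1
      · subst hk1
        have hc : 1 ≤ (1 : Int) ∧ (1 : Int) ≤ ((n :: pvZeros (n + 1) rest).length : Int) := by
          simp
        rw [if_pos hc, if_pos hc]
        simp [pvRowCnt, hb, PySem.List.pyGetD_zero_cons]
      · have hiff : (1 ≤ k ∧ k ≤ ((n :: pvZeros (n + 1) rest).length : Int)) ↔
            (1 ≤ k - 1 ∧ k - 1 ≤ (((pvZeros (n + 1) rest).length : Nat) : Int)) := by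
          simp; omega
        have hrc : pvRowCnt k (b :: rest) = pvRowCnt (k - 1) rest := by
          simp [pvRowCnt, hb, hk1]
        by_cases hc : 1 ≤ k - 1 ∧ k - 1 ≤ (((pvZeros (n + 1) rest).length : Nat) : Int)
        · rw [if_pos (hiff.mpr hc), if_pos (hiff.mpr hc)]
          obtain ⟨h1, h2⟩ := hc
          have hget : PySem.List.pyGetD (n :: pvZeros (n + 1) rest) (k - 1) 0
              = (pvZeros (n + 1) rest).getD ((k - 2).toNat) 0 := by
            rw [show k - 1 = ((((k - 2).toNat + 1 : Nat)) : Int) by omega,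
              PySem.List.pyGetD_natCast, List.getD_cons_succ]
          have hget2 : PySem.List.pyGetD (pvZeros (n + 1) rest) (k - 1 - 1) 0
              = (pvZeros (n + 1) rest).getD ((k - 2).toNat) 0 := by
            rw [show k - 1 - 1 = (((k - 2).toNat : Nat) : Int) by omega,
              PySem.List.pyGetD_natCast]
          have hIH := ih (n + 1) (k - 1)
          rw [if_pos ⟨h1, h2⟩, if_pos ⟨h1, h2⟩, hget2] at hIH
          rw [hget, hrc]
          omega
        · rw [if_neg ((not_congr hiff).mpr hc), if_neg ((not_congr hiff).mpr hc)]
          have hIH := ih (n + 1) (k - 1)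
          rw [if_neg hc, if_neg hc] at hIH
          rw [hrc]
          simp only [List.length_cons] at *
          push_cast at *
          omega
    · rw [pvZeros_cons, if_neg hb]
      have hrc : pvRowCnt k (b :: rest) = 1 + pvRowCnt k rest := by
        simp [pvRowCnt, hb]
      have hIH := ih (n + 1) k
      by_cases hc : 1 ≤ k ∧ k ≤ (((pvZeros (n + 1) rest).length : Nat) : Int)
      · rw [if_pos hc, if_pos hc] at hIH
        rw [if_pos hc, if_pos hc, hrc]
        omega
      · rw [if_neg hc, if_neg hc] at hIH
        rw [if_neg hc, if_neg hc, hrc]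
        simp only [List.length_cons] at *
        push_cast at *
        omega

-- index fold over range(len sq) accessing both lists = fold over zip, when sq fits in bm
theorem pvZipFold (f : Int → List Int → String → Int) :
    ∀ (sq : List String) (bm : List (List Int)) (init : Int), sq.length ≤ bm.length →
    (List.range sq.length).foldl (fun c k => f c (bm.getD k []) (sq.getD k "")) init
    = (bm.zip sq).foldl (fun c p => f c p.1 p.2) init := by
  intro sq
  induction sq with
  | nil => intro bm init _; simp
  | cons s sq' ih =>
    intro bm init hlen
    cases bm with
    | nil => simp at hlen
    | cons b bm' =>
      simp only [List.length_cons]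
      rw [List.range_succ_eq_map]
      simp only [List.foldl_cons, List.foldl_map, List.getD_cons_zero, List.getD_cons_succ,
        List.zip_cons_cons]
      exact ih bm' (f init b s) (by simpa using hlen)

-- ===== VERDICT (by name: the statement is the Claim_ definition above) =====
theorem numOfInsertedIndels_spec : Claim_equal_numOfInsertedIndels := by
  intro bitmatrix seq _hDom hPre
  unfold Spec_numOfInsertedIndels numOfInsertedIndels numOfInsertedIndels_alt
  rw [PySem.List.pyRange_zero_natCast, List.foldl_map]
  simp only [PySem.List.pyGetD_natCast]
  rw [pvZipFold (fun c row s => pvaRow (PySem.Str.len s) row 0 c) seq bitmatrix 0 hPre]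
  congr 1
  funext c p
  rw [pvaRow_eq]
  have hB := pvBRow_eq p.1 0 (PySem.Str.len p.2)
  simp only [sub_zero] at hB ⊢
  show c + pvRowCnt (PySem.Str.len p.2) p.1 = _
  rw [show List.filterMap (fun jb : Int × Int => if jb.2 = 0 then some jb.1 else none)
      (PySem.List.enumerate p.1 0) = pvZeros 0 p.1 from rfl]
  by_cases hc : 1 ≤ PySem.Str.len p.2 ∧
      PySem.Str.len p.2 ≤ ((pvZeros 0 p.1).length : Int)
  · rw [if_pos hc] at hB
    rw [if_pos hc]
    simp only [pvZeros] at hB ⊢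
    omega
  · rw [if_neg hc] at hB
    rw [if_neg hc]
    simp only [pvZeros] at hB ⊢
    omega
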